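-- pv_equiv track=rewrite | github.com/hungyen0402/lap_trinh_python | PYKT066.py | find_min_length_subarray_with_gcd_k
-- ===== SOURCE A (Python) =====
-- import math
--
-- def find_min_length_subarray_with_gcd_k(N, K, A):
--     min_length = float('inf')
--     found = False
--
--     # Duyệt qua từng vị trí bắt đầu của dãy con
--     for i in range(N):
--         current_gcd = A[i]
--
--         # Kiểm tra các dãy con bắt đầu từ vị trí i
--         for j in range(i, N):
--             current_gcd = math.gcd(current_gcd, A[j])
--
--             # Nếu GCD bằng K, cập nhật độ dài nhỏ nhất
--             if current_gcd == K:
--                 min_length = min(min_length, j - i + 1)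
--                 found = True
--                 break  # Dừng lại vì dãy con đã thỏa mãn
--
--             # Nếu GCD nhỏ hơn K, không cần kiểm tra thêm vì các phần tử sau sẽ không làm tăng GCD
--             if current_gcd < K:
--                 break
--
--     return min_length if found else -1
-- ===== SOURCE B (Python) =====
-- import math
--
-- def _merge_runs(pairs):
--     # keep only the last pair of each run of equal adjacent gcd values
--     if len(pairs) <= 1:
--         return pairs
--     if pairs[0][0] == pairs[1][0]:
--         return _merge_runs(pairs[1:])
--     return [pairs[0]] + _merge_runs(pairs[1:])
--
-- def find_min_length_subarray_with_gcd_k(N, K, A):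
--     # Endpoint DP: for each end j, maintain the O(log A) distinct gcds of subarrays
--     # ending at j, each with the largest start attaining it; the largest start with
--     # gcd == K gives the shortest subarray ending at j.
--     best = -1
--     gs = []  # (gcd of A[i..j], i), i ascending, distinct gcds, for the current j
--     for j in range(N):
--         x = A[j]
--         gs = _merge_runs([(math.gcd(g, x), i) for g, i in gs] + [(abs(x), j)])
--         i_hit = next((i for g, i in reversed(gs) if g == K), None)
--         if i_hit is not None:
--             length = j - i_hit + 1
--             if best == -1 or length < best:
--                 best = length
--     return best
-- ===== Notes on version B (the rewrite author's own statement) =====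
-- stated objective: alternative
-- what changed: Replaces A's start-anchored nested scans (with gcd==K / gcd<K pruning breaks) by a single left-to-right pass over endpoints that maintains the O(log A) distinct gcds of subarrays ending at the current index (each with the largest start attaining it) and reads off the shortest hit per endpoint.
import Mathlib
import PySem

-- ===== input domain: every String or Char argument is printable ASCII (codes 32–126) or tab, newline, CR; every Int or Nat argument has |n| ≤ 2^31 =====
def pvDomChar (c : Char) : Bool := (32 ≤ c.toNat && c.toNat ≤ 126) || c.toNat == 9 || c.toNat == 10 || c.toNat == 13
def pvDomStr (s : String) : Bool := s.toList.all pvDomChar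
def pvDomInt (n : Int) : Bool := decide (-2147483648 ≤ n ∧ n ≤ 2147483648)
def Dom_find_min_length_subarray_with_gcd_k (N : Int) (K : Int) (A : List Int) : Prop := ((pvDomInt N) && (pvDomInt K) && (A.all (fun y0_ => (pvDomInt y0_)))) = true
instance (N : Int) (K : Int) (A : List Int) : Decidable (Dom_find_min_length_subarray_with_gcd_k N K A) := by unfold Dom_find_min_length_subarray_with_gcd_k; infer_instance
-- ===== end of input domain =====

-- B replaces A's start-anchored nested scans (with gcd-pruning breaks) by a single left-to-right
-- endpoint DP that maintains the distinct gcds of the subarrays ending at the current index,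
-- each with the largest start attaining it (objective: alternative).

-- math.gcd of two Python ints (always nonnegative)
def pvGstep (g x : Int) : Int := (Int.gcd g x : Int)

-- ===== PORT A =====
-- inner loop of A: j runs from `j` while `c` iterations remain; returns the length found at this start i
def pvInnerA (K : Int) (L : List Int) (i : Nat) : Nat → Nat → Int → Option Nat
  | 0, _, _ => none
  | c + 1, j, g =>
    let g' := pvGstep g (L.getD j 0)
    if g' = K then some (j + 1 - i)
    else if g' < K then none
    else pvInnerA K L i c (j + 1) g'

def find_min_length_subarray_with_gcd_k (N : Int) (K : Int) (A : List Int) : Int :=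
  match (List.range N.toNat).foldl (fun o i =>
      match pvInnerA K A i (N.toNat - i) i (A.getD i 0) with
      | some len => some (match o with | none => len | some m => Nat.min m len)
      | none => o) (none : Option Nat) with
  | some m => (m : Int)
  | none => -1

-- ===== PORT B =====
-- _merge_runs: keep only the last pair of each run of equal adjacent gcd values
def pvMergeRuns : List (Int × Nat) → List (Int × Nat)
  | [] => []
  | [p] => [p]
  | p :: q :: t => if p.1 = q.1 then pvMergeRuns (q :: t) else p :: pvMergeRuns (q :: t)

-- one step of B's loop over the endpoint j: update the (gcd, start) list, then scan it from the back
def pvStepGs (x : Int) (j : Nat) (gs : List (Int × Nat)) : List (Int × Nat) :=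
  pvMergeRuns (gs.map (fun p => (pvGstep p.1 x, p.2)) ++ [((x.natAbs : Int), j)])

def pvStepB (K : Int) (L : List Int) (st : Int × List (Int × Nat)) (j : Nat) : Int × List (Int × Nat) :=
  let x := L.getD j 0
  let gs := pvStepGs x j st.2
  match gs.reverse.find? (fun p => p.1 == K) with
  | some p =>
      let len : Int := (j : Int) - (p.2 : Int) + 1
      (if st.1 = -1 ∨ len < st.1 then len else st.1, gs)
  | none => (st.1, gs)

def find_min_length_subarray_with_gcd_k_alt (N : Int) (K : Int) (A : List Int) : Int :=
  ((List.range N.toNat).foldl (pvStepB K A) (-1, [])).1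

-- ===== PRECONDITION & SPEC =====
-- A (and B) raise IndexError when N exceeds len(A); Pre_ excludes exactly those inputs.
def Pre_find_min_length_subarray_with_gcd_k (N : Int) (K : Int) (A : List Int) : Prop :=
  N ≤ (A.length : Int)
instance (N : Int) (K : Int) (A : List Int) : Decidable (Pre_find_min_length_subarray_with_gcd_k N K A) := by unfold Pre_find_min_length_subarray_with_gcd_k; infer_instance

def pvWitness_find_min_length_subarray_with_gcd_k : Int × Int × List Int := (3, 2, [4, 2, 6])

def Spec_find_min_length_subarray_with_gcd_k (N : Int) (K : Int) (A : List Int) (out : Int) : Prop := out = find_min_length_subarray_with_gcd_k_alt N K A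
instance (N : Int) (K : Int) (A : List Int) (out : Int) : Decidable (Spec_find_min_length_subarray_with_gcd_k N K A out) := by unfold Spec_find_min_length_subarray_with_gcd_k; infer_instance

-- ===== CLAIM (what is proved, stated in full; the proofs are below) =====
def Claim_equal_find_min_length_subarray_with_gcd_k : Prop := ∀ (N : Int) (K : Int) (A : List Int), Dom_find_min_length_subarray_with_gcd_k N K A → Pre_find_min_length_subarray_with_gcd_k N K A → Spec_find_min_length_subarray_with_gcd_k N K A (find_min_length_subarray_with_gcd_k N K A)

-- ===== LEMMAS AND PROOFS =====

-- the gcd of the subarray L[i..j] (inclusive), folded from 0 (gcd(0,x) = |x|)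
def pvSeg (L : List Int) (i j : Nat) : List Int := (L.drop i).take (j + 1 - i)
def pvGfold (g : Int) (xs : List Int) : Int := xs.foldl pvGstep g
def pvG (L : List Int) (i j : Nat) : Int := pvGfold 0 (pvSeg L i j)

-- the spec-level version of A's inner loop, driven by pvG only
def pvFS (K : Int) (L : List Int) (i : Nat) : Nat → Nat → Option Nat
  | 0, _ => none
  | c + 1, j =>
    if pvG L i j = K then some (j + 1 - i)
    else if pvG L i j < K then none
    else pvFS K L i c (j + 1)

-- lengths A's outer loop collects / B's per-endpoint hits collect / all valid lengths
def pvCollectA (K : Int) (L : List Int) (n : Nat) : List Nat :=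
  (List.range n).filterMap (fun i => pvFS K L i (n - i) i)
def pvHit (K : Int) (L : List Int) (j : Nat) : Option Nat :=
  (List.range (j + 1)).reverse.find? (fun i => pvG L i j == K)
def pvCollectB (K : Int) (L : List Int) (n : Nat) : List Nat :=
  (List.range n).filterMap (fun j => (pvHit K L j).map (fun i => j + 1 - i))
def pvAllLens (K : Int) (L : List Int) (n : Nat) : List Nat :=
  (List.range n).flatMap (fun i =>
    ((List.range n).filter (fun j => decide (i ≤ j) && (pvG L i j == K))).map (fun j => j + 1 - i))

theorem pvGstep_nonneg (g x : Int) : 0 ≤ pvGstep g x := Int.natCast_nonneg _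

theorem pvGfold_dvd (xs : List Int) (g : Int) : pvGfold g xs ∣ g := by
  induction xs generalizing g with
  | nil => simp [pvGfold]
  | cons x t ih => exact dvd_trans (ih (pvGstep g x)) (Int.gcd_dvd_left g x)

theorem pvGfold_nonneg (xs : List Int) : ∀ g : Int, 0 ≤ g → 0 ≤ pvGfold g xs := by
  induction xs with
  | nil => intro g hg; simpa [pvGfold] using hg
  | cons x t ih => intro g _; exact ih (pvGstep g x) (pvGstep_nonneg g x)

theorem pvG_nonneg (L : List Int) (i j : Nat) : 0 ≤ pvG L i j :=
  pvGfold_nonneg _ 0 le_rfl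

theorem pvSeg_split (L : List Int) {i m j : Nat} (him : i ≤ m) (hmj : m ≤ j) :
    pvSeg L i j = pvSeg L i m ++ pvSeg L (m + 1) j := by
  unfold pvSeg
  have h1 : j + 1 - i = (m + 1 - i) + (j - m) := by omega
  rw [h1, List.take_add, List.drop_drop]
  have h2 : i + (m + 1 - i) = m + 1 := by omega
  rw [h2, show j + 1 - (m + 1) = j - m from by omega]

theorem pvG_split (L : List Int) {i m j : Nat} (him : i ≤ m) (hmj : m ≤ j) :
    pvG L i j = pvGfold (pvG L i m) (pvSeg L (m + 1) j) := by
  rw [pvG, pvSeg_split L him hmj, pvGfold, List.foldl_append]; rfl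

theorem pvG_dvd (L : List Int) {i m j : Nat} (him : i ≤ m) (hmj : m ≤ j) :
    pvG L i j ∣ pvG L i m := by
  rw [pvG_split L him hmj]; exact pvGfold_dvd _ _

theorem pvG_zero_shift (L : List Int) {i m j : Nat} (him : i ≤ m) (hmj : m ≤ j)
    (h0 : pvG L i m = 0) : pvG L (m + 1) j = pvG L i j := by
  rw [pvG_split L him hmj, h0]; rfl

theorem pvSeg_single (L : List Int) {i : Nat} (h : i < L.length) :
    pvSeg L i i = [L.getD i 0] := by
  unfold pvSeg
  have h1 : i + 1 - i = 1 := by omega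
  rw [h1, List.drop_eq_getElem_cons h, List.take_succ_cons, List.take_zero, List.getD_eq_getElem _ _ h]

theorem pvG_self (L : List Int) {i : Nat} (h : i < L.length) :
    pvG L i i = pvGstep 0 (L.getD i 0) := by
  rw [pvG, pvSeg_single L h]; rfl

theorem pvG_succ (L : List Int) {i j : Nat} (hij : i ≤ j + 1) (hj : j + 1 < L.length) :
    pvG L i (j + 1) = pvGstep (pvG L i j) (L.getD (j + 1) 0) := by
  rcases Nat.lt_or_ge i (j + 1) with hlt | hge
  · have him : i ≤ j := by omega
    rw [pvG_split L him (Nat.le_succ j), pvSeg_single L hj]; rfl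
  · have hi : i = j + 1 := by omega
    subst hi
    rw [pvG_self L hj]
    have : pvG L (j + 1) j = 0 := by
      unfold pvG pvSeg
      have : j + 1 - (j + 1) = 0 := by omega
      rw [this]; rfl
    rw [this]

-- A's inner loop equals its pvG-driven spec
theorem pvInnerA_eq_FS (K : Int) (L : List Int) (i : Nat) :
    ∀ c j g, j + c ≤ L.length → i ≤ j →
      (j < L.length → pvGstep g (L.getD j 0) = pvG L i j) →
      pvInnerA K L i c j g = pvFS K L i c j := by
  intro c
  induction c with
  | zero => intro j g _ _ _; rfl
  | succ c ih =>
    intro j g hlen hij hg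
    have hj : j < L.length := by omega
    rw [pvInnerA, pvFS]
    simp only [hg hj]
    split_ifs with h1 h2
    · rfl
    · rfl
    · exact ih (j + 1) (pvG L i j) (by omega) (by omega)
        (fun hj1 => (pvG_succ L (by omega) hj1).symm)

theorem pvFS_some (K : Int) (L : List Int) (i : Nat) :
    ∀ c j0 l, pvFS K L i c j0 = some l →
      ∃ j, j0 ≤ j ∧ j < j0 + c ∧ pvG L i j = K ∧ l = j + 1 - i := by
  intro c
  induction c with
  | zero => intro j0 l h; simp [pvFS] at h
  | succ c ih =>
    intro j0 l h
    rw [pvFS] at h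
    split_ifs at h with h1 h2
    · exact ⟨j0, le_rfl, by omega, h1, (Option.some.inj h).symm⟩
    · obtain ⟨j, hj1, hj2, hj3, hj4⟩ := ih (j0 + 1) l h
      exact ⟨j, by omega, by omega, hj3, hj4⟩

theorem pvFS_dom (K : Int) (L : List Int) (i : Nat) :
    ∀ c j0 j, i ≤ j0 → j0 ≤ j → j < j0 + c → pvG L i j = K →
      (∃ l, pvFS K L i c j0 = some l ∧ l ≤ j + 1 - i) ∨
      (∃ m, j0 ≤ m ∧ m < j ∧ pvG L i m = 0) := by
  intro c
  induction c with
  | zero => intro j0 j _ _ hc _; omega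
  | succ c ih =>
    intro j0 j hij0 hj0j hjc hK
    rw [pvFS]
    split_ifs with h1 h2
    · exact Or.inl ⟨j0 + 1 - i, rfl, by omega⟩
    · -- pvG L i j0 < K: then j0 < j and pvG L i j0 = 0
      have hne : j0 ≠ j := fun he => by rw [he, hK] at h2; omega
      have hj0j' : j0 < j := by omega
      by_cases h0 : pvG L i j0 = 0
      · exact Or.inr ⟨j0, le_rfl, hj0j', h0⟩
      · exfalso
        have hdvd : pvG L i j ∣ pvG L i j0 := pvG_dvd L hij0 (le_of_lt hj0j')
        have hpos : 0 < pvG L i j0 := lt_of_le_of_ne (pvG_nonneg L i j0) (Ne.symm h0)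
        have := Int.le_of_dvd hpos hdvd
        rw [hK] at this
        omega
    · -- K < pvG L i j0, so j0 < j; recurse
      have hne : j0 ≠ j := fun he => by rw [he, hK] at h1; exact h1 rfl
      rcases ih (j0 + 1) j (by omega) (by omega) (by omega) hK with ⟨l, hl1, hl2⟩ | ⟨m, hm1, hm2, hm3⟩
      · exact Or.inl ⟨l, hl1, hl2⟩
      · exact Or.inr ⟨m, by omega, hm2, hm3⟩

-- membership in pvAllLens
theorem pvAllLens_mem (K : Int) (L : List Int) (n : Nat) (l : Nat) :
    l ∈ pvAllLens K L n ↔ ∃ i j, i ≤ j ∧ j < n ∧ pvG L i j = K ∧ l = j + 1 - i := by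
  unfold pvAllLens
  simp only [List.mem_flatMap, List.mem_map, List.mem_filter, List.mem_range,
    Bool.and_eq_true, decide_eq_true_eq, beq_iff_eq]
  constructor
  · rintro ⟨i, hi, j, ⟨hj, hij, hK⟩, hl⟩
    exact ⟨i, j, hij, hj, hK, hl.symm⟩
  · rintro ⟨i, j, hij, hj, hK, hl⟩
    exact ⟨i, by omega, j, ⟨hj, hij, hK⟩, hl.symm⟩

theorem pvCollectA_sub (K : Int) (L : List Int) (n : Nat) :
    ∀ l ∈ pvCollectA K L n, l ∈ pvAllLens K L n := by
  intro l hl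
  unfold pvCollectA at hl
  rw [List.mem_filterMap] at hl
  obtain ⟨i, hi, hfs⟩ := hl
  rw [List.mem_range] at hi
  obtain ⟨j, hj1, hj2, hj3, hj4⟩ := pvFS_some K L i (n - i) i l hfs
  rw [pvAllLens_mem]
  exact ⟨i, j, hj1, by omega, hj3, hj4⟩

theorem pvCollectA_dom_aux (K : Int) (L : List Int) (n : Nat) :
    ∀ d i j, j + 1 - i = d → i ≤ j → j < n → pvG L i j = K →
      ∃ s ∈ pvCollectA K L n, s ≤ j + 1 - i := by
  intro d
  induction d using Nat.strong_induction_on with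
  | _ d ihd =>
  intro i j hd hij hjn hK
  rcases pvFS_dom K L i (n - i) i j le_rfl hij (by omega) hK with ⟨l, hl1, hl2⟩ | ⟨m, hm1, hm2, hm3⟩
  · refine ⟨l, ?_, hl2⟩
    unfold pvCollectA
    rw [List.mem_filterMap]
    exact ⟨i, by rw [List.mem_range]; omega, hl1⟩
  · have hK' : pvG L (m + 1) j = K := by
      rw [pvG_zero_shift L hm1 (by omega) hm3]; exact hK
    obtain ⟨s, hs1, hs2⟩ := ihd (j + 1 - (m + 1)) (by omega) (m + 1) j rfl (by omega) hjn hK'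
    exact ⟨s, hs1, by omega⟩

theorem pvCollectA_dom (K : Int) (L : List Int) (n : Nat) :
    ∀ t ∈ pvAllLens K L n, ∃ s ∈ pvCollectA K L n, s ≤ t := by
  intro t ht
  rw [pvAllLens_mem] at ht
  obtain ⟨i, j, hij, hjn, hK, hl⟩ := ht
  subst hl
  exact pvCollectA_dom_aux K L n _ i j rfl hij hjn hK

theorem pvRevFind_max (p : Nat → Bool) :
    ∀ m i, i < m → p i = true →
      ∃ i', (List.range m).reverse.find? p = some i' ∧ i ≤ i' := by
  intro m
  induction m with
  | zero => intro i h; omega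
  | succ m ih =>
    intro i hi hp
    rw [List.range_succ, List.reverse_append, List.reverse_singleton, List.singleton_append]
    rcases hpm : p m with _ | _
    · have hi' : i < m := by
        rcases Nat.lt_or_ge i m with h | h
        · exact h
        · have : i = m := by omega
          rw [this] at hp; rw [hp] at hpm; exact absurd hpm (by simp)
      obtain ⟨i', h1, h2⟩ := ih i hi' hp
      exact ⟨i', by rw [List.find?_cons, hpm]; exact h1, h2⟩
    · exact ⟨m, by rw [List.find?_cons, hpm], by omega⟩

theorem pvHit_some (K : Int) (L : List Int) {j i : Nat} (h : pvHit K L j = some i) :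
    i ≤ j ∧ pvG L i j = K := by
  unfold pvHit at h
  have hmem := List.find?_some h
  have hmem2 := List.mem_of_find?_eq_some h
  rw [List.mem_reverse, List.mem_range] at hmem2
  rw [beq_iff_eq] at hmem
  exact ⟨by omega, hmem⟩

theorem pvHit_max (K : Int) (L : List Int) {i j : Nat} (hij : i ≤ j) (hK : pvG L i j = K) :
    ∃ i', pvHit K L j = some i' ∧ i ≤ i' ∧ i' ≤ j ∧ pvG L i' j = K := by
  obtain ⟨i', h1, h2⟩ := pvRevFind_max (fun i => pvG L i j == K) (j + 1) i (by omega) (by rw [beq_iff_eq]; exact hK)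
  have h3 := pvHit_some K L (h1 : pvHit K L j = some i')
  exact ⟨i', h1, h2, h3.1, h3.2⟩

theorem pvCollectB_sub (K : Int) (L : List Int) (n : Nat) :
    ∀ l ∈ pvCollectB K L n, l ∈ pvAllLens K L n := by
  intro l hl
  unfold pvCollectB at hl
  rw [List.mem_filterMap] at hl
  obtain ⟨j, hj, hmap⟩ := hl
  rw [List.mem_range] at hj
  rw [Option.map_eq_some_iff] at hmap
  obtain ⟨i, hhit, hl⟩ := hmap
  obtain ⟨hij, hK⟩ := pvHit_some K L hhit
  rw [pvAllLens_mem]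
  exact ⟨i, j, hij, hj, hK, hl.symm⟩

theorem pvCollectB_dom (K : Int) (L : List Int) (n : Nat) :
    ∀ t ∈ pvAllLens K L n, ∃ s ∈ pvCollectB K L n, s ≤ t := by
  intro t ht
  rw [pvAllLens_mem] at ht
  obtain ⟨i, j, hij, hjn, hK, hl⟩ := ht
  obtain ⟨i', hhit, hii', hi'j, hK'⟩ := pvHit_max K L hij hK
  refine ⟨j + 1 - i', ?_, by omega⟩
  unfold pvCollectB
  rw [List.mem_filterMap]
  exact ⟨j, by rw [List.mem_range]; omega, by rw [hhit]; rfl⟩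

theorem pvMin?_dominates (S T : List Nat)
    (hsub : ∀ s ∈ S, s ∈ T) (hdom : ∀ t ∈ T, ∃ s ∈ S, s ≤ t) : S.min? = T.min? := by
  rcases hT : T.min? with _ | t
  · rw [List.min?_eq_none_iff] at hT
    subst hT
    rw [List.min?_eq_none_iff]
    rcases hS : S with _ | ⟨s, S'⟩
    · rfl
    · exact absurd (hsub s (by simp [hS])) (List.not_mem_nil)
  · rw [List.min?_eq_some_iff] at hT
    obtain ⟨htT, htle⟩ := hT
    obtain ⟨s, hsS, hst⟩ := hdom t htT
    rw [List.min?_eq_some_iff]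
    have h1 : t ≤ s := htle s (hsub s hsS)
    have hts : t = s := le_antisymm h1 hst
    exact ⟨hts ▸ hsS, fun b hb => htle b (hsub b hb)⟩

def pvMinStep (o : Option Nat) (len : Nat) : Option Nat :=
  some (match o with | none => len | some m => Nat.min m len)

theorem pvOptMinFold_cons (t : List Nat) : ∀ x : Nat,
    t.foldl pvMinStep (some x) = (x :: t).min? := by
  induction t with
  | nil => intro x; rfl
  | cons y t ih =>
    intro x
    have h1 : List.foldl pvMinStep (some x) (y :: t) = List.foldl pvMinStep (some (Nat.min x y)) t := rfl
    rw [h1, ih (Nat.min x y)]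
    rw [List.min?_cons, List.min?_cons, List.min?_cons]
    cases t.min? <;> simp [Nat.min_assoc]

theorem pvOptMinFold (xs : List Nat) :
    xs.foldl pvMinStep none = xs.min? := by
  cases xs with
  | nil => rfl
  | cons x t =>
    have h1 : List.foldl pvMinStep none (x :: t) = List.foldl pvMinStep (some x) t := rfl
    rw [h1, pvOptMinFold_cons]

theorem pvMin?_append_singleton (xs : List Nat) (a : Nat) :
    (xs ++ [a]).min? = some (xs.min?.elim a (fun v => Nat.min v a)) := by
  induction xs with
  | nil => rfl
  | cons x t ih =>
    rw [List.cons_append, List.min?_cons, ih, List.min?_cons]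
    cases t.min? <;> simp [Nat.min_assoc]

-- A's result in terms of pvCollectA
theorem pvA_eq (K : Int) (L : List Int) (N : Int) (h : N ≤ (L.length : Int)) :
    find_min_length_subarray_with_gcd_k N K L =
      match (pvCollectA K L N.toNat).min? with
      | some m => (m : Int)
      | none => -1 := by
  have hn : N.toNat ≤ L.length := Int.toNat_le.mpr h
  unfold find_min_length_subarray_with_gcd_k
  have hcongr : (List.range N.toNat).foldl (fun o i =>
      match pvInnerA K L i (N.toNat - i) i (L.getD i 0) with
      | some len => some (match o with | none => len | some m => Nat.min m len)
      | none => o) (none : Option Nat) =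
      (List.range N.toNat).foldl (fun o i =>
      match pvFS K L i (N.toNat - i) i with
      | some len => pvMinStep o len
      | none => o) (none : Option Nat) := by
    apply PySem.List.foldl_congr_mem
    intro acc i hi
    rw [List.mem_range] at hi
    have hfs : pvInnerA K L i (N.toNat - i) i (L.getD i 0) = pvFS K L i (N.toNat - i) i := by
      apply pvInnerA_eq_FS K L i (N.toNat - i) i (L.getD i 0) (by omega) le_rfl
      intro hil
      rw [pvG_self L hil]
      simp [pvGstep, Int.gcd, Nat.gcd_self]
    rw [hfs]
    rfl
  have hfold : ∀ (l : List Nat) (acc : Option Nat),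
      l.foldl (fun o i => match pvFS K L i (N.toNat - i) i with
        | some len => pvMinStep o len
        | none => o) acc
        = (l.filterMap (fun i => pvFS K L i (N.toNat - i) i)).foldl pvMinStep acc := by
    intro l
    induction l with
    | nil => intro acc; rfl
    | cons x t ih =>
      intro acc
      rw [List.foldl_cons, List.filterMap_cons]
      cases pvFS K L x (N.toNat - x) x <;> simp [ih]
  rw [hcongr, hfold, pvOptMinFold]
  rfl

theorem pvMergeRuns_cons_cons (p q : Int × Nat) (t : List (Int × Nat)) :
    pvMergeRuns (p :: q :: t) =
      if p.1 = q.1 then pvMergeRuns (q :: t) else p :: pvMergeRuns (q :: t) := rfl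

theorem pvMergeRuns_head : ∀ (q : Int × Nat) (t : List (Int × Nat)),
    ∃ i D', pvMergeRuns (q :: t) = (q.1, i) :: D' := by
  intro q t
  induction t generalizing q with
  | nil => exact ⟨q.2, [], rfl⟩
  | cons q2 t2 ih =>
    rw [pvMergeRuns_cons_cons]
    split_ifs with h
    · obtain ⟨i, D', hD⟩ := ih q2
      exact ⟨i, D', by rw [hD, h]⟩
    · exact ⟨q.2, pvMergeRuns (q2 :: t2), rfl⟩

-- find?-from-the-back is unchanged by merging runs: the last element of each run is kept
theorem pvMergeRuns_find_back (K : Int) : ∀ l : List (Int × Nat),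
    (pvMergeRuns l).reverse.find? (fun p => p.1 == K) = l.reverse.find? (fun p => p.1 == K) := by
  intro l
  induction l using pvMergeRuns.induct with
  | case1 => rfl
  | case2 p => rfl
  | case3 p q t h ih =>
    rw [pvMergeRuns_cons_cons, if_pos h, ih]
    rw [List.reverse_cons (a := p), List.find?_append]
    cases hfq : List.find? (fun p => p.1 == K) (q :: t).reverse with
    | some r => rfl
    | none =>
      rw [List.find?_eq_none] at hfq
      have hq : ¬ (q.1 == K) = true := hfq q (by simp)
      have hp : ((fun p : Int × Nat => p.1 == K) p) = false := by
        simp only [h]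
        simpa using hq
      simp [List.find?, hp]
  | case4 p q t h ih =>
    rw [pvMergeRuns_cons_cons, if_neg h]
    rw [List.reverse_cons (a := p), List.find?_append,
      List.reverse_cons (a := p), List.find?_append, ih]

-- merging runs first does not change the merged result of a key-transformed list
theorem pvMergeRuns_map_gstep (x : Int) (r : List (Int × Nat)) : ∀ l : List (Int × Nat),
    pvMergeRuns ((pvMergeRuns l).map (fun p => (pvGstep p.1 x, p.2)) ++ r) =
      pvMergeRuns (l.map (fun p => (pvGstep p.1 x, p.2)) ++ r) := by
  intro l
  induction l using pvMergeRuns.induct with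
  | case1 => rfl
  | case2 p => rfl
  | case3 p q t h ih =>
    have e1 : pvMergeRuns (p :: q :: t) = pvMergeRuns (q :: t) := by
      rw [pvMergeRuns_cons_cons, if_pos h]
    rw [e1, ih]
    have e2 : (p :: q :: t).map (fun p => (pvGstep p.1 x, p.2)) ++ r =
        (pvGstep p.1 x, p.2) :: (pvGstep q.1 x, q.2) :: ((t.map (fun p => (pvGstep p.1 x, p.2))) ++ r) := rfl
    rw [e2, pvMergeRuns_cons_cons, if_pos (show (pvGstep p.1 x, p.2).1 = (pvGstep q.1 x, q.2).1 from by rw [show p.1 = q.1 from h])]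
    rfl
  | case4 p q t h ih =>
    obtain ⟨i, D', hD⟩ := pvMergeRuns_head q t
    have e1 : pvMergeRuns (p :: q :: t) = p :: pvMergeRuns (q :: t) := by
      rw [pvMergeRuns_cons_cons, if_neg h]
    rw [e1, hD]
    have e2 : (p :: (q.1, i) :: D').map (fun p => (pvGstep p.1 x, p.2)) ++ r =
        (pvGstep p.1 x, p.2) :: (pvGstep q.1 x, i) :: ((D'.map (fun p => (pvGstep p.1 x, p.2))) ++ r) := rfl
    rw [e2, pvMergeRuns_cons_cons]
    have e3 : pvMergeRuns ((pvGstep q.1 x, i) :: ((D'.map (fun p => (pvGstep p.1 x, p.2))) ++ r)) =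
        pvMergeRuns ((q :: t).map (fun p => (pvGstep p.1 x, p.2)) ++ r) := by
      have e4 : (pvGstep q.1 x, i) :: ((D'.map (fun p => (pvGstep p.1 x, p.2))) ++ r) =
          (((q.1, i) :: D').map (fun p => (pvGstep p.1 x, p.2))) ++ r := rfl
      rw [e4, ← hD, ih]
    rw [e3]
    have e5 : (p :: q :: t).map (fun p => (pvGstep p.1 x, p.2)) ++ r =
        (pvGstep p.1 x, p.2) :: (pvGstep q.1 x, q.2) :: ((t.map (fun p => (pvGstep p.1 x, p.2))) ++ r) := rfl
    rw [e5, pvMergeRuns_cons_cons]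
    split_ifs with h1
    · rfl
    · rfl

-- B's result in terms of pvCollectB
theorem pvB_eq (K : Int) (L : List Int) (N : Int) (h : N ≤ (L.length : Int)) :
    find_min_length_subarray_with_gcd_k_alt N K L =
      match (pvCollectB K L N.toNat).min? with
      | some m => (m : Int)
      | none => -1 := by
  have hn : N.toNat ≤ L.length := Int.toNat_le.mpr h
  have key : ∀ m, m ≤ L.length →
      (List.range m).foldl (pvStepB K L) (-1, []) =
        ((match (pvCollectB K L m).min? with | some v => (v : Int) | none => -1 : Int),
         pvMergeRuns ((List.range m).map (fun i => (pvG L i (m - 1), i)))) := by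
    intro m
    induction m with
    | zero => intro _; rfl
    | succ m ihm =>
      intro hm1
      rw [List.range_succ, List.foldl_append, List.foldl_cons, List.foldl_nil,
        ihm (by omega)]
      have hmap : ((List.range m).map (fun i => (pvG L i (m - 1), i))).map
            (fun p => (pvGstep p.1 (L.getD m 0), p.2)) ++ [(((L.getD m 0).natAbs : Int), m)] =
          (List.range (m + 1)).map (fun i => (pvG L i m, i)) := by
        rw [List.map_map, List.range_succ, List.map_append, List.map_singleton]
        congr 1
        · apply List.map_congr_left
          intro i hi
          rw [List.mem_range] at hi
          have hstep : pvG L i m = pvGstep (pvG L i (m - 1)) (L.getD m 0) := by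
            have h2 := pvG_succ L (i := i) (j := m - 1) (by omega) (by omega)
            rwa [show m - 1 + 1 = m from by omega] at h2
          simp only [Function.comp]
          rw [hstep]
        · rw [pvG_self L (by omega)]
          simp [pvGstep, Int.gcd]
      have hgs : pvStepGs (L.getD m 0) m
            (pvMergeRuns ((List.range m).map (fun i => (pvG L i (m - 1), i)))) =
          pvMergeRuns ((List.range (m + 1)).map (fun i => (pvG L i m, i))) := by
        unfold pvStepGs
        rw [pvMergeRuns_map_gstep, hmap]
      have hfind : (pvMergeRuns ((List.range (m + 1)).map (fun i => (pvG L i m, i)))).reverse.find?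
            (fun p => p.1 == K) =
          (pvHit K L m).map (fun i => (pvG L i m, i)) := by
        rw [pvMergeRuns_find_back, ← List.map_reverse, List.find?_map]
        rfl
      show pvStepB K L _ m = _
      unfold pvStepB
      simp only [hgs, hfind]
      cases hhit : pvHit K L m with
      | none =>
        simp only [Option.map_none]
        have hcb : pvCollectB K L (m + 1) = pvCollectB K L m := by
          unfold pvCollectB
          rw [List.range_succ, List.filterMap_append]
          simp [hhit]
        rw [hcb]
        simp [List.range_succ]
      | some i =>
        simp only [Option.map_some]
        obtain ⟨him, hKi⟩ := pvHit_some K L hhit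
        have hcb : pvCollectB K L (m + 1) = pvCollectB K L m ++ [m + 1 - i] := by
          unfold pvCollectB
          rw [List.range_succ, List.filterMap_append]
          simp [hhit]
        rw [hcb, pvMin?_append_singleton, Prod.mk.injEq]
        refine ⟨?_, by simp [List.range_succ]⟩
        cases hmin : (pvCollectB K L m).min? with
        | none =>
          simp only [Option.elim]
          simp only [true_or, if_true]
          omega
        | some v =>
          simp only [Option.elim]
          have hv1 : 1 ≤ v := by
            have hvmem : v ∈ pvCollectB K L m := (List.min?_eq_some_iff.mp hmin).1
            unfold pvCollectB at hvmem
            rw [List.mem_filterMap] at hvmem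
            obtain ⟨j, _, hj2⟩ := hvmem
            rw [Option.map_eq_some_iff] at hj2
            obtain ⟨i', hi'1, hi'2⟩ := hj2
            have := (pvHit_some K L hi'1).1
            omega
          have hminv : Nat.min v (m + 1 - i) = v ∨ Nat.min v (m + 1 - i) = m + 1 - i := by
            rcases Nat.le_total v (m + 1 - i) with h2 | h2
            · exact Or.inl (Nat.min_eq_left h2)
            · exact Or.inr (Nat.min_eq_right h2)
          have hminle : Nat.min v (m + 1 - i) ≤ v ∧ Nat.min v (m + 1 - i) ≤ m + 1 - i :=
            ⟨Nat.min_le_left _ _, Nat.min_le_right _ _⟩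
          simp only [show ((v : Int) = -1 ∨ (m : Int) - (i : Int) + 1 < (v : Int)) ↔
            ((m : Int) - (i : Int) + 1 < (v : Int)) from by omega]
          split_ifs with hcond <;> omega
  unfold find_min_length_subarray_with_gcd_k_alt
  rw [key N.toNat hn]

-- ===== VERDICT (by name: the statement is the Claim_ definition above) =====
theorem find_min_length_subarray_with_gcd_k_spec : Claim_equal_find_min_length_subarray_with_gcd_k := by
  intro N K A _ hpre
  unfold Spec_find_min_length_subarray_with_gcd_k
  rw [pvA_eq K A N hpre, pvB_eq K A N hpre,
    pvMin?_dominates _ _ (pvCollectA_sub K A N.toNat) (pvCollectA_dom K A N.toNat),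
    pvMin?_dominates _ _ (pvCollectB_sub K A N.toNat) (pvCollectB_dom K A N.toNat)]
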